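-- pv_equiv track=rewrite | github.com/quantmew/ripperdoc | ripperdoc/utils/permissions/shell_command_validation.py | _strip_single_quotes
-- ===== SOURCE A (Python) =====
-- def _strip_single_quotes(shell_command: str, first_token: str) -> str:
--     """Strip content inside single quotes, handling escapes properly.
--
--     Single-quoted content in shell is literal and cannot contain command
--     substitution, so we can safely ignore it for security analysis.
--
--     Double quotes are kept for analysis since they can contain variable
--     expansions and command substitutions.
--     """
--     in_single_quote = False
--     escaped = False
--     result = []
--
--     i = 0
--     while i < len(shell_command):
--         char = shell_command[i]
--
--         if escaped:
--             escaped = False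
--             result.append(char)
--             i += 1
--             continue
--
--         if char == "\\":
--             escaped = True
--             result.append(char)
--             i += 1
--             continue
--
--         if char == "'":
--             in_single_quote = not in_single_quote
--             i += 1
--             continue
--
--         if not in_single_quote:
--             result.append(char)
--
--         i += 1
--
--     return "".join(result)
-- ===== SOURCE B (Python) =====
-- import re
--
-- def _strip_single_quotes(shell_command: str, first_token: str) -> str:
--     """Strip content inside single quotes, handling escapes properly.
--
--     Tokenize first: each backslash-escape is one two-char token, every other
--     character is its own token; then a single pass with only an
--     in_single_quote flag.
--     """
--     tokens = re.findall(r"\\[\s\S]|[\s\S]", shell_command)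
--     in_single_quote = False
--     out = []
--     for tok in tokens:
--         if tok.startswith("\\"):
--             out.append(tok)
--         elif tok == "'":
--             in_single_quote = not in_single_quote
--         elif not in_single_quote:
--             out.append(tok)
--     return "".join(out)
-- ===== Notes on version B (the rewrite author's own statement) =====
-- stated objective: alternative
-- what changed: Replaced the index-based char loop with an escaped flag by a regex pre-tokenization (backslash-escape pairs vs single chars) followed by a single pass that keeps only an in_single_quote flag.
import Mathlib
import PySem

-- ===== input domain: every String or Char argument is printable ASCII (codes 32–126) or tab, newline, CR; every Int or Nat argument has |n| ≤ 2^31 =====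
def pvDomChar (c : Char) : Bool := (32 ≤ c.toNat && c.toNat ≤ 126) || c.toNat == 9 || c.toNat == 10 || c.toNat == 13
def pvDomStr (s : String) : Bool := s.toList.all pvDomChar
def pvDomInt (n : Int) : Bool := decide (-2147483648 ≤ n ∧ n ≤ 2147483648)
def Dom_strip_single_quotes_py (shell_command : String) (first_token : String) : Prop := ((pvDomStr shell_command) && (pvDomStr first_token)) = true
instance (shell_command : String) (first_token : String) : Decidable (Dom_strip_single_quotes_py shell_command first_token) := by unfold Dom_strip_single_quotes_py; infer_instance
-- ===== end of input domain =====

-- B replaces A's index loop with an escaped flag by pre-tokenizing into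
-- backslash-escape pairs / single chars and a single pass with only an
-- in_single_quote flag (objective: alternative decomposition, same cost).


-- ===== PORT A =====
-- A's while-loop over indices, carried as structural recursion over the
-- remaining characters with the same (in_single_quote, escaped) state.
def stripA_loop : List Char → Bool → Bool → List Char
  | [], _, _ => []
  | c :: rest, insq, esc =>
    if esc then c :: stripA_loop rest insq false
    else if c = '\\' then c :: stripA_loop rest insq true
    else if c = '\'' then stripA_loop rest (!insq) false
    else if !insq then c :: stripA_loop rest insq false
    else stripA_loop rest insq false

def strip_single_quotes_py (shell_command : String) (_first_token : String) : String :=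
  String.mk (stripA_loop shell_command.toList false false)

-- ===== PORT B =====
-- re.findall(r"\\[\s\S]|[\s\S]", s): a backslash plus its following char is
-- one two-char token, otherwise each char is its own token (a trailing lone
-- backslash is a one-char token).
def stripB_tokenize : List Char → List (List Char)
  | [] => []
  | c :: rest =>
    if c = '\\' then
      match rest with
      | [] => [c] :: stripB_tokenize []
      | d :: tl => [c, d] :: stripB_tokenize tl
    else [c] :: stripB_tokenize rest

-- the for-loop over tokens, keeping only the in_single_quote flag
def stripB_loop : List (List Char) → Bool → List Char
  | [], _ => []
  | t :: rest, insq =>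
    if t.head? = some '\\' then t ++ stripB_loop rest insq
    else if t = ['\''] then stripB_loop rest (!insq)
    else if !insq then t ++ stripB_loop rest insq
    else stripB_loop rest insq

def strip_single_quotes_py_alt (shell_command : String) (_first_token : String) : String :=
  String.mk (stripB_loop (stripB_tokenize shell_command.toList) false)

-- ===== PRECONDITION & SPEC =====
def Spec_strip_single_quotes_py (shell_command : String) (first_token : String) (out : String) : Prop := out = strip_single_quotes_py_alt shell_command first_token
instance (shell_command : String) (first_token : String) (out : String) : Decidable (Spec_strip_single_quotes_py shell_command first_token out) := by unfold Spec_strip_single_quotes_py; infer_instance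

-- ===== CLAIM (what is proved, stated in full; the proofs are below) =====
def Claim_equal_strip_single_quotes_py : Prop := ∀ (shell_command : String) (first_token : String), Dom_strip_single_quotes_py shell_command first_token → Spec_strip_single_quotes_py shell_command first_token (strip_single_quotes_py shell_command first_token)

-- ===== LEMMAS AND PROOFS =====
theorem stripB_tokenize_cons_ne {c : Char} {rest : List Char} (hc : c ≠ '\\') :
    stripB_tokenize (c :: rest) = [c] :: stripB_tokenize rest := by
  cases rest with
  | nil => simp [stripB_tokenize, hc]
  | cons d tl => simp [stripB_tokenize, hc]

theorem stripAB_loop_eq : ∀ (l : List Char) (q : Bool),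
    stripA_loop l q false = stripB_loop (stripB_tokenize l) q
  | [], _ => rfl
  | c :: rest, q => by
    by_cases hc : c = '\\'
    · subst hc
      cases rest with
      | nil => rfl
      | cons d tl =>
        simp only [stripA_loop, stripB_tokenize, stripB_loop, List.head?, if_true]
        simpa using stripAB_loop_eq tl q
    · by_cases hq : c = '\''
      · subst hq
        rw [stripB_tokenize_cons_ne hc]
        simp only [stripA_loop, stripB_loop, if_neg hc]
        simpa using stripAB_loop_eq rest (!q)
      · rw [stripB_tokenize_cons_ne hc]
        simp only [stripA_loop, stripB_loop, if_neg hc, if_neg hq, List.head?]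
        have h1 : ¬ (some c = some '\\') := by simp [hc]
        have h2 : ¬ ([c] = ['\'']) := by simp [hq]
        cases q with
        | false => simp [h1, h2, stripAB_loop_eq rest false]
        | true => simp [h1, h2, stripAB_loop_eq rest true]
  termination_by l _ => l.length

-- ===== VERDICT (by name: the statement is the Claim_ definition above) =====
theorem strip_single_quotes_py_spec : Claim_equal_strip_single_quotes_py := by
  intro s ft _
  unfold Spec_strip_single_quotes_py strip_single_quotes_py strip_single_quotes_py_alt
  rw [stripAB_loop_eq]
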